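-- pv_equiv track=rewrite | github.com/vickyhaha-af/campus_mode | campus/backend/services/institutions.py | _expand_acronyms
-- ===== SOURCE A (Python) =====
-- _ACRONYM_EXPANSIONS = {
--     "iit": "indian institute of technology",
--     "iim": "indian institute of management",
--     "nit": "national institute of technology",
--     "iiit": "indian institute of information technology",
--     "iisc": "indian institute of science",
--     "aiims": "all india institute of medical sciences",
--     "isi": "indian statistical institute",
--     "isb": "indian school of business",
--     "bits": "birla institute of technology and science",
--     "xlri": "xavier labour relations institute",
--     "spjimr": "s p jain institute of management and research",
--     "jbims": "jamnalal bajaj institute of management studies",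
--     "mdi": "management development institute",
--     "vjti": "veermata jijabai technological institute",
--     "coep": "college of engineering pune",
--     "daiict": "dhirubhai ambani institute of information and communication technology",
--     "vit": "vellore institute of technology",
--     "mica": "mudra institute of communications ahmedabad",
--     "scmhrd": "symbiosis centre for management and human resource development",
--     "iift": "indian institute of foreign trade",
--     "imt": "institute of management technology",
--     "irma": "institute of rural management anand",
--     "ximb": "xavier institute of management bhubaneswar",
--     "nmims": "narsee monjee institute of management studies",
--     "dtu": "delhi technological university",
--     "nsut": "netaji subhas university of technology",
--     "jntu": "jawaharlal nehru technological university",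
--     "lpu": "lovely professional university",
--     "rvce": "r v college of engineering",
--     "pes": "pes university",
--     "srm": "sri ramaswamy memorial",
--     "kiit": "kalinga institute of industrial technology",
--     "sastra": "shanmugha arts science technology and research academy",
--     "psg": "psg college of technology",
--     "ssn": "sri sivasubramaniya nadar college of engineering",
-- }
--
-- def _expand_acronyms(tokens: set) -> set:
--     """Return a superset of tokens that also includes the expansion words of
--     any acronym present. So a resume saying 'IIM Ranchi' also matches
--     'Indian Institute of Management Ranchi' and vice versa."""
--     out = set(tokens)
--     for t in list(tokens):
--         expansion = _ACRONYM_EXPANSIONS.get(t)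
--         if expansion:
--             out.update(expansion.split())
--     # Reverse: if full phrase tokens are all present, add the acronym.
--     for acr, phrase in _ACRONYM_EXPANSIONS.items():
--         phrase_tokens = set(phrase.split())
--         if phrase_tokens.issubset(tokens):
--             out.add(acr)
--     return out
-- ===== SOURCE B (Python) =====
-- # The acronym table below is the module's shared DATA (unchanged from the original
-- # module context); B's logic never uses it directly — it only reads the derived
-- # _WORDS table and _INDEX inverted index precomputed once below.
-- _ACRONYM_EXPANSIONS = {
--     "iit": "indian institute of technology",
--     "iim": "indian institute of management",
--     "nit": "national institute of technology",
--     "iiit": "indian institute of information technology",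
--     "iisc": "indian institute of science",
--     "aiims": "all india institute of medical sciences",
--     "isi": "indian statistical institute",
--     "isb": "indian school of business",
--     "bits": "birla institute of technology and science",
--     "xlri": "xavier labour relations institute",
--     "spjimr": "s p jain institute of management and research",
--     "jbims": "jamnalal bajaj institute of management studies",
--     "mdi": "management development institute",
--     "vjti": "veermata jijabai technological institute",
--     "coep": "college of engineering pune",
--     "daiict": "dhirubhai ambani institute of information and communication technology",
--     "vit": "vellore institute of technology",
--     "mica": "mudra institute of communications ahmedabad",
--     "scmhrd": "symbiosis centre for management and human resource development",
--     "iift": "indian institute of foreign trade",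
--     "imt": "institute of management technology",
--     "irma": "institute of rural management anand",
--     "ximb": "xavier institute of management bhubaneswar",
--     "nmims": "narsee monjee institute of management studies",
--     "dtu": "delhi technological university",
--     "nsut": "netaji subhas university of technology",
--     "jntu": "jawaharlal nehru technological university",
--     "lpu": "lovely professional university",
--     "rvce": "r v college of engineering",
--     "pes": "pes university",
--     "srm": "sri ramaswamy memorial",
--     "kiit": "kalinga institute of industrial technology",
--     "sastra": "shanmugha arts science technology and research academy",
--     "psg": "psg college of technology",
--     "ssn": "sri sivasubramaniya nadar college of engineering",
-- }
--
-- # Precomputed once at import: acronym -> list of phrase words (every phrase has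
-- # pairwise-distinct words), and an inverted index phrase word -> acronyms.
-- _WORDS = {acr: phrase.split() for acr, phrase in _ACRONYM_EXPANSIONS.items()}
-- _INDEX = {}
-- for _acr, _ws in _WORDS.items():
--     for _w in _ws:
--         _INDEX.setdefault(_w, []).append(_acr)
--
--
-- def _expand_acronyms(tokens: set) -> set:
--     """Stream-based rewrite: instead of mutating a set in two loops, build three
--     candidate streams — the tokens, the expansion words of acronym tokens, and
--     the acronyms whose per-acronym hit counter (driven by the inverted index in
--     a single pass over the tokens) equals its phrase's word count — then turn
--     the concatenated stream into a set."""
--     base = list(tokens)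
--     hits = {}
--     for t in base:
--         for acr in _INDEX.get(t, ()):
--             hits[acr] = hits.get(acr, 0) + 1
--     expanded = [w for t in base for w in _WORDS.get(t, ())]
--     acronyms = [acr for acr, ws in _WORDS.items() if hits.get(acr, 0) == len(ws)]
--     return set(base + expanded + acronyms)
-- ===== Notes on version B (the rewrite author's own statement) =====
-- stated objective: alternative
-- what changed: Instead of mutating a set in two loops (forward expansion updates, then a subset test per dictionary phrase), B builds three candidate streams - the tokens, the expansion words looked up in a precomputed word table, and the acronyms selected by per-acronym hit counters driven by a precomputed inverted index (phrase word -> acronyms) in a single pass over the tokens - and dedupes the concatenated stream once with an explicit seen-set loop.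
import Mathlib
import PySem

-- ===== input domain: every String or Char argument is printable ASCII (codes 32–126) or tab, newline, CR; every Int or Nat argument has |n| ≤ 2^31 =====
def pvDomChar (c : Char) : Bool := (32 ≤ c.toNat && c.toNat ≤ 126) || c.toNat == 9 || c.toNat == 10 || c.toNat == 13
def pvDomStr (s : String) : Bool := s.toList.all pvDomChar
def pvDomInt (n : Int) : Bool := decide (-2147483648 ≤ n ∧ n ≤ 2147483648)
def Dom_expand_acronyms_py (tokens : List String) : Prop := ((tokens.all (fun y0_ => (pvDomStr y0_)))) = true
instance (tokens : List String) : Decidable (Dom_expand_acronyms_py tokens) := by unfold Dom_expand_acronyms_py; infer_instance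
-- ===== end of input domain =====

-- B replaces A's two set-mutating passes by three candidate streams (tokens, expansion words via a
-- precomputed word table, acronyms selected by per-acronym hit counters driven by an inverted index
-- in one pass over the tokens) concatenated and turned into a set (alternative decomposition; return
-- value only — the Python output is a set, whose iteration order is not modelled).


set_option maxRecDepth 1000000

-- ===== PORT A =====
def pvAcronyms : PySem.Dict String String := PySem.Dict.ofList [
  ("iit", "indian institute of technology"),
  ("iim", "indian institute of management"),
  ("nit", "national institute of technology"),
  ("iiit", "indian institute of information technology"),
  ("iisc", "indian institute of science"),
  ("aiims", "all india institute of medical sciences"),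
  ("isi", "indian statistical institute"),
  ("isb", "indian school of business"),
  ("bits", "birla institute of technology and science"),
  ("xlri", "xavier labour relations institute"),
  ("spjimr", "s p jain institute of management and research"),
  ("jbims", "jamnalal bajaj institute of management studies"),
  ("mdi", "management development institute"),
  ("vjti", "veermata jijabai technological institute"),
  ("coep", "college of engineering pune"),
  ("daiict", "dhirubhai ambani institute of information and communication technology"),
  ("vit", "vellore institute of technology"),
  ("mica", "mudra institute of communications ahmedabad"),
  ("scmhrd", "symbiosis centre for management and human resource development"),
  ("iift", "indian institute of foreign trade"),
  ("imt", "institute of management technology"),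
  ("irma", "institute of rural management anand"),
  ("ximb", "xavier institute of management bhubaneswar"),
  ("nmims", "narsee monjee institute of management studies"),
  ("dtu", "delhi technological university"),
  ("nsut", "netaji subhas university of technology"),
  ("jntu", "jawaharlal nehru technological university"),
  ("lpu", "lovely professional university"),
  ("rvce", "r v college of engineering"),
  ("pes", "pes university"),
  ("srm", "sri ramaswamy memorial"),
  ("kiit", "kalinga institute of industrial technology"),
  ("sastra", "shanmugha arts science technology and research academy"),
  ("psg", "psg college of technology"),
  ("ssn", "sri sivasubramaniya nadar college of engineering")]

-- out.update(expansion.split()) guarded by the truthiness of the dictionary .get(t)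
def pvFwdStep (out : PySem.Set String) (t : String) : PySem.Set String :=
  match pvAcronyms.get? t with
  | some expansion =>
      if expansion.toList ≠ [] then PySem.Set.update out (PySem.Str.split₀ expansion) else out
  | none => out

def expand_acronyms_py (tokens : List String) : List String :=
  let out := PySem.Set.ofList tokens
  let out := tokens.foldl pvFwdStep out
  pvAcronyms.items.foldl (fun out p =>
    if PySem.Set.issubset (PySem.Set.ofList (PySem.Str.split₀ p.2)) tokens
    then PySem.Set.add out p.1 else out) out

-- ===== PORT B =====
-- _WORDS of Source B: a module constant computed once at import ({acr: phrase.split()}); ported as its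
-- runtime value (proved below to equal mapping split over the acronym table: pvWordTable_eq).
def pvWordTable : List (String × List String) := [
  ("iit", ["indian", "institute", "of", "technology"]),
  ("iim", ["indian", "institute", "of", "management"]),
  ("nit", ["national", "institute", "of", "technology"]),
  ("iiit", ["indian", "institute", "of", "information", "technology"]),
  ("iisc", ["indian", "institute", "of", "science"]),
  ("aiims", ["all", "india", "institute", "of", "medical", "sciences"]),
  ("isi", ["indian", "statistical", "institute"]),
  ("isb", ["indian", "school", "of", "business"]),
  ("bits", ["birla", "institute", "of", "technology", "and", "science"]),
  ("xlri", ["xavier", "labour", "relations", "institute"]),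
  ("spjimr", ["s", "p", "jain", "institute", "of", "management", "and", "research"]),
  ("jbims", ["jamnalal", "bajaj", "institute", "of", "management", "studies"]),
  ("mdi", ["management", "development", "institute"]),
  ("vjti", ["veermata", "jijabai", "technological", "institute"]),
  ("coep", ["college", "of", "engineering", "pune"]),
  ("daiict", ["dhirubhai", "ambani", "institute", "of", "information", "and", "communication", "technology"]),
  ("vit", ["vellore", "institute", "of", "technology"]),
  ("mica", ["mudra", "institute", "of", "communications", "ahmedabad"]),
  ("scmhrd", ["symbiosis", "centre", "for", "management", "and", "human", "resource", "development"]),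
  ("iift", ["indian", "institute", "of", "foreign", "trade"]),
  ("imt", ["institute", "of", "management", "technology"]),
  ("irma", ["institute", "of", "rural", "management", "anand"]),
  ("ximb", ["xavier", "institute", "of", "management", "bhubaneswar"]),
  ("nmims", ["narsee", "monjee", "institute", "of", "management", "studies"]),
  ("dtu", ["delhi", "technological", "university"]),
  ("nsut", ["netaji", "subhas", "university", "of", "technology"]),
  ("jntu", ["jawaharlal", "nehru", "technological", "university"]),
  ("lpu", ["lovely", "professional", "university"]),
  ("rvce", ["r", "v", "college", "of", "engineering"]),
  ("pes", ["pes", "university"]),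
  ("srm", ["sri", "ramaswamy", "memorial"]),
  ("kiit", ["kalinga", "institute", "of", "industrial", "technology"]),
  ("sastra", ["shanmugha", "arts", "science", "technology", "and", "research", "academy"]),
  ("psg", ["psg", "college", "of", "technology"]),
  ("ssn", ["sri", "sivasubramaniya", "nadar", "college", "of", "engineering"])]

def pvWordDict : PySem.Dict String (List String) := PySem.Dict.ofList pvWordTable

-- _INDEX of Source B: the inverted index, _INDEX.setdefault(w, []).append(acr)
def pvInvIndex : PySem.Dict String (List String) :=
  pvWordTable.foldl (fun d p =>
    p.2.foldl (fun d w => d.modify w [] (· ++ [p.1])) d) PySem.Dict.empty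

def expand_acronyms_py_alt (tokens : List String) : List String :=
  let hits := tokens.foldl (fun (h : PySem.Dict String Int) t =>
      (pvInvIndex.getD t []).foldl (fun h acr => h.modify acr 0 (· + 1)) h) PySem.Dict.empty
  let expanded := tokens.flatMap (fun t => pvWordDict.getD t [])
  let acronyms := (pvWordTable.filter
      (fun p => hits.getD p.1 0 == (p.2.length : Int))).map (·.1)
  PySem.Set.ofList (tokens ++ expanded ++ acronyms)

-- ===== PRECONDITION & SPEC =====
-- tokens has Python type set[str]; its List encoding holds the distinct elements, so Pre_ only
-- states that the list is a faithful encoding of a set (no duplicates) — it excludes no set input.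
def Pre_expand_acronyms_py (tokens : List String) : Prop := tokens.Nodup
instance (tokens : List String) : Decidable (Pre_expand_acronyms_py tokens) := by unfold Pre_expand_acronyms_py; infer_instance
def pvWitness_expand_acronyms_py : List String := (["iim", "ranchi"])

def Spec_expand_acronyms_py (tokens : List String) (out : List String) : Prop := out = expand_acronyms_py_alt tokens
instance (tokens : List String) (out : List String) : Decidable (Spec_expand_acronyms_py tokens out) := by unfold Spec_expand_acronyms_py; infer_instance

-- ===== CLAIM (what is proved, stated in full; the proofs are below) =====
def Claim_equal_expand_acronyms_py : Prop := ∀ (tokens : List String), Dom_expand_acronyms_py tokens → Pre_expand_acronyms_py tokens → Spec_expand_acronyms_py tokens (expand_acronyms_py tokens)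

-- ===== LEMMAS AND PROOFS =====

-- the literal word table IS the split of the acronym table (checked on the literals)
set_option maxRecDepth 200000 in
theorem pvWordTable_eq :
    pvWordTable = pvAcronyms.items.map (fun p => (p.1, PySem.Str.split₀ p.2)) := by decide

set_option maxRecDepth 200000 in
theorem pvKeysNodup : (pvWordTable.map (·.1)).Nodup := by decide

set_option maxRecDepth 200000 in
theorem pvWordsNodup : ∀ p ∈ pvWordTable, p.2.Nodup := by decide

set_option maxRecDepth 200000 in
theorem pvValuesNonempty : ∀ p ∈ pvAcronyms.items, p.2.toList ≠ [] := by decide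

set_option maxRecDepth 200000 in
theorem pvWordDictKeys : pvWordDict.keys = pvAcronyms.keys := by decide

set_option maxRecDepth 200000 in
theorem pvWordDictKeysNodup : pvWordDict.keys.Nodup := by decide

set_option maxRecDepth 200000 in
theorem pvWordDictItems : pvWordDict.items = pvWordTable := by decide

-- pointwise: A's guarded forward update is updating with the word table's entry
theorem pvFwdStep_eq (s : PySem.Set String) (t : String) :
    pvFwdStep s t = PySem.Set.update s (pvWordDict.getD t []) := by
  unfold pvFwdStep
  cases h : pvAcronyms.get? t with
  | none =>
      have hk : t ∉ pvAcronyms.keys := (PySem.Dict.get?_eq_none_iff_not_mem_keys _ _).1 h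
      have h2 : pvWordDict.get? t = none :=
        (PySem.Dict.get?_eq_none_iff_not_mem_keys _ _).2 (pvWordDictKeys ▸ hk)
      rw [PySem.Dict.getD_eq_get?_getD, h2]; rfl
  | some e =>
      have hmem : (t, e) ∈ pvAcronyms.items := PySem.Dict.mem_items_of_get?_eq_some _ h
      have hne : e.toList ≠ [] := pvValuesNonempty _ hmem
      have hmem2 : (t, PySem.Str.split₀ e) ∈ pvWordDict.items := by
        rw [pvWordDictItems, pvWordTable_eq]
        exact List.mem_map.2 ⟨(t, e), hmem, rfl⟩
      have h2 : pvWordDict.getD t [] = PySem.Str.split₀ e :=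
        PySem.Dict.getD_of_mem_items _ hmem2 pvWordDictKeysNodup []
      rw [h2]
      show (if e.toList ≠ [] then PySem.Set.update s (PySem.Str.split₀ e) else s)
          = PySem.Set.update s (PySem.Str.split₀ e)
      exact if_pos hne

-- the forward loop equals folding set-insertion over the flattened expansion stream
theorem pvForward (l : List String) (s : PySem.Set String) :
    l.foldl pvFwdStep s
      = (l.flatMap (fun t => pvWordDict.getD t [])).foldl PySem.Set.add s := by
  induction l generalizing s with
  | nil => rfl
  | cons t l ih =>
      rw [List.foldl_cons, List.flatMap_cons, List.foldl_append, ih, pvFwdStep_eq]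
      rfl

-- a filtered-then-mapped stream folded with add is the conditional-add loop
theorem pvFilterFold (l : List (String × List String))
    (q : String × List String → Bool) (s : PySem.Set String) :
    ((l.filter q).map (·.1)).foldl PySem.Set.add s
      = l.foldl (fun out p => if q p then PySem.Set.add out p.1 else out) s := by
  induction l generalizing s with
  | nil => rfl
  | cons p l ih =>
      rw [List.foldl_cons, List.filter_cons]
      by_cases hq : q p
      · rw [if_pos hq, if_pos hq, List.map_cons, List.foldl_cons]; exact ih _
      · rw [if_neg hq, if_neg hq]; exact ih _

-- one inner loop of the index construction appends acr exactly where t is a word of the phrase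
theorem pvBuildInner (ws : List String) (acr : String) (d : PySem.Dict String (List String))
    (hws : ws.Nodup) (t : String) :
    (ws.foldl (fun d w => d.modify w [] (· ++ [acr])) d).getD t []
      = d.getD t [] ++ (if t ∈ ws then [acr] else []) := by
  have h1 : ws.foldl (fun d w => d.modify w [] (· ++ [acr])) d
      = (ws.map (fun w => (w, acr))).foldl (fun d p => d.modify p.1 [] (· ++ [p.2])) d := by
    rw [List.foldl_map]
  rw [h1, PySem.Dict.getD_foldl_modify_append]
  congr 1
  have h2 : (ws.map (fun w => (w, acr))).filter (fun p => p.1 == t)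
      = (ws.filter (fun w => w == t)).map (fun w => (w, acr)) := by
    rw [List.filter_map]; rfl
  rw [h2, List.filter_beq, List.map_replicate]
  rcases Decidable.em (t ∈ ws) with h | h
  · have : ws.count t = 1 :=
      Nat.le_antisymm (List.nodup_iff_count_le_one.1 hws t) (List.count_pos_iff.2 h)
    simp [this, h]
  · simp [List.count_eq_zero_of_not_mem h, h]

-- full characterisation of the inverted index
theorem pvIndexGetD (t : String) :
    pvInvIndex.getD t [] = pvWordTable.flatMap (fun p => if t ∈ p.2 then [p.1] else []) := by
  have main : ∀ (pw : List (String × List String)) (d : PySem.Dict String (List String)),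
      (∀ p ∈ pw, p.2.Nodup) →
      (pw.foldl (fun d p => p.2.foldl (fun d w => d.modify w [] (· ++ [p.1])) d) d).getD t []
        = d.getD t [] ++ pw.flatMap (fun p => if t ∈ p.2 then [p.1] else []) := by
    intro pw
    induction pw with
    | nil => intro d _; simp
    | cons p pw ih =>
      intro d h
      rw [List.foldl_cons, ih _ (fun q hq => h q (List.mem_cons_of_mem p hq)),
        pvBuildInner p.2 p.1 d (h p (List.mem_cons_self)) t]
      simp
  have h := main pvWordTable PySem.Dict.empty pvWordsNodup
  rw [show (PySem.Dict.empty : PySem.Dict String (List String)).getD t [] = [] from rfl,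
    List.nil_append] at h
  exact h

-- count of acr in the index entry of t: 1 iff t is a word of acr's phrase
theorem pvIndexCount (acr : String) (ws : List String) (h : (acr, ws) ∈ pvWordTable) (t : String) :
    (pvInvIndex.getD t []).count acr = if t ∈ ws then 1 else 0 := by
  rw [pvIndexGetD]
  have main : ∀ (pw : List (String × List String)), (pw.map (·.1)).Nodup → (acr, ws) ∈ pw →
      (pw.flatMap (fun p => if t ∈ p.2 then [p.1] else [])).count acr = if t ∈ ws then 1 else 0 := by
    intro pw
    induction pw with
    | nil => intro _ h; cases h
    | cons p pw ih =>
      intro hnd hmem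
      have hnd' := hnd
      rw [List.map_cons, List.nodup_cons] at hnd'
      rcases List.mem_cons.1 hmem with rfl | hmem'
      · have hz : (pw.flatMap (fun p => if t ∈ p.2 then [p.1] else [])).count acr = 0 := by
          rw [List.count_eq_zero]
          intro hc
          obtain ⟨q, hq, hq2⟩ := List.mem_flatMap.1 hc
          have hq1 : acr = q.1 := by
            by_cases ht : t ∈ q.2
            · simp [ht] at hq2; exact hq2
            · simp [ht] at hq2
          exact hnd'.1 (List.mem_map.2 ⟨q, hq, hq1.symm⟩)
        by_cases ht : t ∈ ws <;> simp [ht, hz]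
      · have hz : (if t ∈ p.2 then [p.1] else []).count acr = 0 := by
          have hne : acr ≠ p.1 := by
            intro h; exact hnd'.1 (h ▸ List.mem_map_of_mem hmem')
          by_cases ht : t ∈ p.2 <;> simp [ht, Ne.symm hne]
        rw [List.flatMap_cons, List.count_append, hz, ih hnd'.2 hmem']
        simp
  exact main pvWordTable pvKeysNodup h

-- the counting pass computes, per acronym, how many tokens are words of its phrase
theorem pvCounts (tokens : List String) (acr : String) (ws : List String)
    (h : (acr, ws) ∈ pvWordTable) :
    (tokens.foldl (fun (h : PySem.Dict String Int) t =>
        (pvInvIndex.getD t []).foldl (fun h acr => h.modify acr 0 (· + 1)) h)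
        PySem.Dict.empty).getD acr 0
      = (tokens.countP (fun t => decide (t ∈ ws)) : Int) := by
  have main : ∀ (l : List String) (d : PySem.Dict String Int),
      (l.foldl (fun (h : PySem.Dict String Int) t =>
          (pvInvIndex.getD t []).foldl (fun h acr => h.modify acr 0 (· + 1)) h) d).getD acr 0
        = d.getD acr 0 + (l.countP (fun t => decide (t ∈ ws)) : Int) := by
    intro l
    induction l with
    | nil => intro d; simp
    | cons t l ih =>
      intro d
      rw [List.foldl_cons, ih]
      have hstep : ((pvInvIndex.getD t []).foldl (fun h acr => h.modify acr 0 (· + 1)) d).getD acr 0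
          = d.getD acr 0 + ((pvInvIndex.getD t []).count acr : Int) :=
        PySem.Dict.getD_foldl_modify_add_one _ _ _
      rw [hstep, pvIndexCount acr ws h t]
      by_cases ht : t ∈ ws
      · simp [ht]
        ring
      · simp [ht]
  have h := main tokens PySem.Dict.empty
  rw [show (PySem.Dict.empty : PySem.Dict String Int).getD acr 0 = 0 from rfl, zero_add] at h
  exact h

-- for duplicate-free lists: all words of ws occur among tokens iff the count of hits is |ws|
theorem pvCountPIff (tokens ws : List String) (h1 : tokens.Nodup) (h2 : ws.Nodup) :
    tokens.countP (fun t => decide (t ∈ ws)) = ws.length ↔ ∀ w ∈ ws, w ∈ tokens := by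
  have hfilt : tokens.countP (fun t => decide (t ∈ ws)) = (tokens.filter (fun t => decide (t ∈ ws))).length :=
    List.countP_eq_length_filter
  have hfnd : (tokens.filter (fun t => decide (t ∈ ws))).Nodup := h1.filter _
  constructor
  · intro heq w hw
    have hsub : (tokens.filter (fun t => decide (t ∈ ws))).toFinset ⊆ ws.toFinset := by
      intro x hx
      rw [List.mem_toFinset] at hx ⊢
      exact of_decide_eq_true (List.mem_filter.1 hx).2
    have hcard : ws.toFinset.card ≤ (tokens.filter (fun t => decide (t ∈ ws))).toFinset.card := by
      rw [List.toFinset_card_of_nodup hfnd, List.toFinset_card_of_nodup h2, ← hfilt, heq]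
    have heqf := Finset.eq_of_subset_of_card_le hsub hcard
    have : w ∈ (tokens.filter (fun t => decide (t ∈ ws))).toFinset := by
      rw [heqf, List.mem_toFinset]; exact hw
    rw [List.mem_toFinset] at this
    exact List.mem_of_mem_filter this
  · intro hsub
    rw [hfilt]
    have hperm : (tokens.filter (fun t => decide (t ∈ ws))).toFinset = ws.toFinset := by
      apply Finset.Subset.antisymm
      · intro x hx
        rw [List.mem_toFinset] at hx ⊢
        exact of_decide_eq_true (List.mem_filter.1 hx).2
      · intro x hx
        rw [List.mem_toFinset] at hx ⊢
        exact List.mem_filter.2 ⟨hsub x hx, decide_eq_true hx⟩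
    have := congrArg Finset.card hperm
    rwa [List.toFinset_card_of_nodup hfnd, List.toFinset_card_of_nodup h2] at this

-- ===== VERDICT (by name: the statement is the Claim_ definition above) =====
theorem expand_acronyms_py_spec : Claim_equal_expand_acronyms_py := by
  intro tokens _ hpre
  unfold Spec_expand_acronyms_py expand_acronyms_py expand_acronyms_py_alt
  simp only []
  conv_rhs => rw [PySem.Set.ofList_eq_foldl]
  rw [List.foldl_append, List.foldl_append,
    show (tokens.foldl PySem.Set.add [] : PySem.Set String) = PySem.Set.ofList tokens from rfl,
    ← pvForward, pvFilterFold]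
  rw [pvWordTable_eq, List.foldl_map]
  apply PySem.List.foldl_congr_mem
  intro acc p hp
  have hmem : (p.1, PySem.Str.split₀ p.2) ∈ pvWordTable := by
    rw [pvWordTable_eq]; exact List.mem_map_of_mem hp
  have hws : (PySem.Str.split₀ p.2).Nodup := pvWordsNodup _ hmem
  have hcond : (PySem.Set.issubset (PySem.Set.ofList (PySem.Str.split₀ p.2)) tokens = true)
      ↔ (((tokens.foldl (fun (h : PySem.Dict String Int) t =>
            (pvInvIndex.getD t []).foldl (fun h acr => h.modify acr 0 (· + 1)) h)
            PySem.Dict.empty).getD p.1 0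
          == ((PySem.Str.split₀ p.2).length : Int)) = true) := by
    rw [beq_iff_eq, pvCounts tokens p.1 _ hmem, Int.natCast_inj,
      pvCountPIff tokens _ hpre hws, PySem.Set.issubset_iff]
    simp [PySem.Set.mem_ofList]
  dsimp only
  exact if_congr (by simpa using hcond) rfl rfl
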